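-- pv_equiv track=rewrite | github.com/Jo-Lam/ErrorProfiler | errorprofiler.py | character_edit_positions
-- ===== SOURCE A (Python) =====
-- def character_edit_positions(str1, str2):
--     # Returns (insertions, deletions, replacements) as position lists
--     m, n = len(str1), len(str2)
--     dp = [[0] * (n + 1) for _ in range(m + 1)]
--     for i in range(m + 1):
--         for j in range(n + 1):
--             if i == 0: dp[i][j] = j
--             elif j == 0: dp[i][j] = i
--             elif str1[i - 1] == str2[j - 1]:
--                 dp[i][j] = dp[i - 1][j - 1]
--             else:
--                 dp[i][j] = 1 + min(dp[i - 1][j], dp[i][j - 1], dp[i - 1][j - 1])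
--     i, j = m, n
--     insert_pos, delete_pos, replace_pos = [], [], []
--     while i > 0 or j > 0:
--         if i > 0 and j > 0 and str1[i - 1] == str2[j - 1]:
--             i -= 1
--             j -= 1
--         elif i > 0 and dp[i][j] == dp[i - 1][j] + 1:
--             delete_pos.append(i - 1)
--             i -= 1
--         elif j > 0 and dp[i][j] == dp[i][j - 1] + 1:
--             insert_pos.append(j - 1)
--             j -= 1
--         else:
--             replace_pos.append(i - 1)
--             i -= 1
--             j -= 1
--     return insert_pos[::-1], delete_pos[::-1], replace_pos[::-1]
-- ===== SOURCE B (Python) =====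
-- def character_edit_positions(str1, str2):
--     # Single forward DP pass: each cell carries a persistent (shared-tail) linked
--     # chain of edit operations, so the answer is read off the last cell's chain;
--     # there is no separate backtrace over the grid.
--     m, n = len(str1), len(str2)
--     prev = []
--     p = None
--     for j in range(n + 1):
--         prev.append((j, p))
--         p = ('I', j, p)
--     for i in range(1, m + 1):
--         cur = [(i, ('D', i - 1, prev[0][1]))]
--         for j in range(1, n + 1):
--             if str1[i - 1] == str2[j - 1]:
--                 cur.append(prev[j - 1])
--             else:
--                 a, pa = prev[j]
--                 b, pb = cur[j - 1]
--                 c, pc = prev[j - 1]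
--                 if a <= b and a <= c:
--                     cur.append((a + 1, ('D', i - 1, pa)))
--                 elif b <= c:
--                     cur.append((b + 1, ('I', j - 1, pb)))
--                 else:
--                     cur.append((c + 1, ('R', i - 1, pc)))
--         prev = cur
--     ins, dele, rep = [], [], []
--     node = prev[n][1]
--     while node is not None:
--         op, pos, nxt = node
--         if op == 'I':
--             ins.append(pos)
--         elif op == 'D':
--             dele.append(pos)
--         else:
--             rep.append(pos)
--         node = nxt
--     return ins[::-1], dele[::-1], rep[::-1]
-- ===== Notes on version B (the rewrite author's own statement) =====
-- stated objective: alternative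
-- what changed: B replaces A's two-phase fill-then-backtrace with a single forward DP pass in which every cell carries a persistent shared-tail linked chain of edit operations; the result is read directly off the last cell's chain, so there is no backtrace over the grid and no full dp table (only one row of (cost, chain) pairs is kept).
import Mathlib
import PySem

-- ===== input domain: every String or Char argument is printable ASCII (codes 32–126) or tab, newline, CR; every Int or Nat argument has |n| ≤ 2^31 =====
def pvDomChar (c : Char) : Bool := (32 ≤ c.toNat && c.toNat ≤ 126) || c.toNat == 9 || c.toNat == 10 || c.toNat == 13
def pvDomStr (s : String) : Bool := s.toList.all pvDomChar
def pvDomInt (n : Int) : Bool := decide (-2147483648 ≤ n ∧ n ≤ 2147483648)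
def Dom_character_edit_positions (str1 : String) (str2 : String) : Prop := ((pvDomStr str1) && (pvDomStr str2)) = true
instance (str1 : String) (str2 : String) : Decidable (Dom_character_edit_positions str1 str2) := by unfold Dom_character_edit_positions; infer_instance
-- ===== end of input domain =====

-- B does the DP in one forward pass where each cell carries a persistent shared-tail chain of
-- edit operations (no dp table, no backtrace phase): alternative decomposition, same cost.

-- ===== PORT A =====
-- row i of A's dp table (Python inner `for j in range(n+1)` filling dp[i][j])
def cedRow (s1 s2 : List Char) (prev : List Int) (i : Nat) : List Int :=
  (List.range (s2.length + 1)).foldl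
    (fun cur (j : Nat) =>
      cur ++ [if i = 0 then (j : Int)
              else if j = 0 then (i : Int)
              else if s1.getD (i - 1) ' ' = s2.getD (j - 1) ' ' then prev.getD (j - 1) 0
              else 1 + min (prev.getD j 0) (min (cur.getD (j - 1) 0) (prev.getD (j - 1) 0))]) []

-- A's dp table (Python outer `for i in range(m+1)`)
def cedTable (s1 s2 : List Char) : List (List Int) :=
  (List.range (s1.length + 1)).foldl
    (fun tb (i : Nat) => tb ++ [cedRow s1 s2 (tb.getD (i - 1) []) i]) []

-- A's traceback loop `while i > 0 or j > 0`, accumulators reversed at the end;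
-- the loop runs exactly until i = j = 0, so fuel = i + j (set by the wrapper) is a pure
-- totality device and is never exhausted early
def cedBackF (s1 s2 : List Char) (dp : List (List Int)) :
    Nat → Nat → Nat → List Int → List Int → List Int → List Int × List Int × List Int
  | 0, _, _, ins, del, rep => (ins.reverse, del.reverse, rep.reverse)
  | fuel + 1, i, j, ins, del, rep =>
    if i = 0 ∧ j = 0 then (ins.reverse, del.reverse, rep.reverse)
    else if 0 < i ∧ 0 < j ∧ s1.getD (i - 1) ' ' = s2.getD (j - 1) ' ' then
      cedBackF s1 s2 dp fuel (i - 1) (j - 1) ins del rep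
    else if 0 < i ∧ (dp.getD i []).getD j 0 = (dp.getD (i - 1) []).getD j 0 + 1 then
      cedBackF s1 s2 dp fuel (i - 1) j ins (del ++ [(i : Int) - 1]) rep
    else if 0 < j ∧ (dp.getD i []).getD j 0 = (dp.getD i []).getD (j - 1) 0 + 1 then
      cedBackF s1 s2 dp fuel i (j - 1) (ins ++ [(j : Int) - 1]) del rep
    else
      cedBackF s1 s2 dp fuel (i - 1) (j - 1) ins del (rep ++ [(i : Int) - 1])

def character_edit_positions (str1 : String) (str2 : String) : List Int × List Int × List Int :=
  cedBackF str1.toList str2.toList (cedTable str1.toList str2.toList)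
    (str1.toList.length + str2.toList.length) str1.toList.length str2.toList.length [] [] []

-- ===== PORT B =====
-- persistent shared-tail chain of edit operations (Python's nested tuples ('I'/'D'/'R', pos, rest) / None)
inductive EPath where
  | nil : EPath
  | node : Char → Int → EPath → EPath
deriving DecidableEq, Repr

-- B's first loop: builds row 0 of (cost, chain) cells, threading the growing insert chain p
def altRow0 (n : Nat) : List (Int × EPath) :=
  ((List.range (n + 1)).foldl
    (fun st (j : Nat) => (st.1 ++ [((j : Int), st.2)], EPath.node 'I' (j : Int) st.2))
    ([], EPath.nil)).1

-- B's inner loop `for j in range(1, n+1)`: builds row i of (cost, chain) cells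
def altRow (s1 s2 : List Char) (prev : List (Int × EPath)) (i : Nat) : List (Int × EPath) :=
  (List.range' 1 s2.length).foldl
    (fun cur (j : Nat) =>
      if s1.getD (i - 1) ' ' = s2.getD (j - 1) ' ' then cur ++ [prev.getD (j - 1) (0, .nil)]
      else
        let a := (prev.getD j (0, .nil)).1
        let pa := (prev.getD j (0, .nil)).2
        let b := (cur.getD (j - 1) (0, .nil)).1
        let pb := (cur.getD (j - 1) (0, .nil)).2
        let c := (prev.getD (j - 1) (0, .nil)).1
        let pc := (prev.getD (j - 1) (0, .nil)).2
        if a ≤ b ∧ a ≤ c then cur ++ [(a + 1, .node 'D' ((i : Int) - 1) pa)]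
        else if b ≤ c then cur ++ [(b + 1, .node 'I' ((j : Int) - 1) pb)]
        else cur ++ [(c + 1, .node 'R' ((i : Int) - 1) pc)])
    [((i : Int), EPath.node 'D' ((i : Int) - 1) (prev.getD 0 (0, .nil)).2)]

-- B's outer loop `for i in range(1, m+1)`: only the previous row is kept
def altFill (s1 s2 : List Char) : List (Int × EPath) :=
  (List.range' 1 s1.length).foldl (fun prev i => altRow s1 s2 prev i) (altRow0 s2.length)

-- B's final `while node is not None` loop: partition the chain into the three lists
def collectP : EPath → List Int → List Int → List Int → List Int × List Int × List Int
  | .nil, ins, del, rep => (ins.reverse, del.reverse, rep.reverse)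
  | .node op pos rest, ins, del, rep =>
    if op = 'I' then collectP rest (ins ++ [pos]) del rep
    else if op = 'D' then collectP rest ins (del ++ [pos]) rep
    else collectP rest ins del (rep ++ [pos])

def character_edit_positions_alt (str1 : String) (str2 : String) : List Int × List Int × List Int :=
  collectP ((altFill str1.toList str2.toList).getD str2.toList.length (0, .nil)).2 [] [] []

-- ===== PRECONDITION & SPEC =====
def Spec_character_edit_positions (str1 : String) (str2 : String) (out : List Int × List Int × List Int) : Prop := out = character_edit_positions_alt str1 str2
instance (str1 : String) (str2 : String) (out : List Int × List Int × List Int) : Decidable (Spec_character_edit_positions str1 str2 out) := by unfold Spec_character_edit_positions; infer_instance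

-- ===== CLAIM (what is proved, stated in full; the proofs are below) =====
def Claim_equal_character_edit_positions : Prop := ∀ (str1 : String) (str2 : String), Dom_character_edit_positions str1 str2 → Spec_character_edit_positions str1 str2 (character_edit_positions str1 str2)

-- ===== LEMMAS AND PROOFS =====

-- mathematical edit-distance recurrence (proof-only)
def Ed (s1 s2 : List Char) : Nat → Nat → Int
  | 0, j => (j : Int)
  | (i+1), 0 => (i : Int) + 1
  | (i+1), (j+1) =>
    if s1.getD i ' ' = s2.getD j ' ' then Ed s1 s2 i j
    else 1 + min (Ed s1 s2 i (j+1)) (min (Ed s1 s2 (i+1) j) (Ed s1 s2 i j))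
termination_by i j => i + j
decreasing_by all_goals omega

-- the chain B's fill is supposed to store at cell (i, j) (proof-only)
def Pathspec (s1 s2 : List Char) : Nat → Nat → EPath
  | 0, 0 => .nil
  | 0, (j+1) => .node 'I' (j : Int) (Pathspec s1 s2 0 j)
  | (i+1), 0 => .node 'D' (i : Int) (Pathspec s1 s2 i 0)
  | (i+1), (j+1) =>
    if s1.getD i ' ' = s2.getD j ' ' then Pathspec s1 s2 i j
    else if Ed s1 s2 i (j+1) ≤ Ed s1 s2 (i+1) j ∧ Ed s1 s2 i (j+1) ≤ Ed s1 s2 i j then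
      .node 'D' (i : Int) (Pathspec s1 s2 i (j+1))
    else if Ed s1 s2 (i+1) j ≤ Ed s1 s2 i j then .node 'I' (j : Int) (Pathspec s1 s2 (i+1) j)
    else .node 'R' (i : Int) (Pathspec s1 s2 i j)
termination_by i j => i + j

theorem min3_eq_left {a b c : Int} : (min a (min b c) = a) ↔ (a ≤ b ∧ a ≤ c) := by
  simp [min_def]; split_ifs <;> omega

theorem min3_eq_mid {a b c : Int} (h : ¬(a ≤ b ∧ a ≤ c)) :
    (min a (min b c) = b) ↔ b ≤ c := by
  simp [min_def]; split_ifs <;> omega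

theorem Ed_zero_left (s1 s2 : List Char) (j : Nat) : Ed s1 s2 0 j = (j : Int) := by
  cases j <;> simp [Ed]

theorem Ed_zero_right (s1 s2 : List Char) (i : Nat) : Ed s1 s2 i 0 = (i : Int) := by
  cases i <;> simp [Ed]

theorem getD_snoc_lt {α : Type} (l : List α) (v d : α) {j : Nat} (h : j < l.length) :
    (l ++ [v]).getD j d = l.getD j d := List.getD_append _ _ _ _ h

theorem getD_snoc_at {α : Type} (l : List α) (v d : α) {j : Nat} (h : j = l.length) :
    (l ++ [v]).getD j d = v := by subst h; simp

-- characterization of A's row fill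
theorem cedRow_spec (s1 s2 : List Char) (prev : List Int) (i : Nat)
    (hprev : 0 < i → ∀ j, j ≤ s2.length → prev.getD j 0 = Ed s1 s2 (i - 1) j) :
    ∀ k, k ≤ s2.length + 1 →
      ((List.range k).foldl
        (fun cur (j : Nat) =>
          cur ++ [if i = 0 then (j : Int)
                  else if j = 0 then (i : Int)
                  else if s1.getD (i - 1) ' ' = s2.getD (j - 1) ' ' then prev.getD (j - 1) 0
                  else 1 + min (prev.getD j 0) (min (cur.getD (j - 1) 0) (prev.getD (j - 1) 0))]) []).length = k
      ∧ ∀ j, j < k →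
        ((List.range k).foldl
          (fun cur (j : Nat) =>
            cur ++ [if i = 0 then (j : Int)
                    else if j = 0 then (i : Int)
                    else if s1.getD (i - 1) ' ' = s2.getD (j - 1) ' ' then prev.getD (j - 1) 0
                    else 1 + min (prev.getD j 0) (min (cur.getD (j - 1) 0) (prev.getD (j - 1) 0))]) []).getD j 0
          = Ed s1 s2 i j := by
  intro k
  induction k with
  | zero => intro _; exact ⟨rfl, by omega⟩
  | succ k ih =>
    intro hk
    obtain ⟨hlen, hval⟩ := ih (by omega)
    rw [List.range_succ, List.foldl_append]
    set r := (List.range k).foldl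
      (fun cur (j : Nat) =>
        cur ++ [if i = 0 then (j : Int)
                else if j = 0 then (i : Int)
                else if s1.getD (i - 1) ' ' = s2.getD (j - 1) ' ' then prev.getD (j - 1) 0
                else 1 + min (prev.getD j 0) (min (cur.getD (j - 1) 0) (prev.getD (j - 1) 0))]) [] with hr
    simp only [List.foldl_cons, List.foldl_nil]
    have hcell :
        (if i = 0 then (k : Int)
         else if k = 0 then (i : Int)
         else if s1.getD (i - 1) ' ' = s2.getD (k - 1) ' ' then prev.getD (k - 1) 0
         else 1 + min (prev.getD k 0) (min (r.getD (k - 1) 0) (prev.getD (k - 1) 0))) = Ed s1 s2 i k := by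
      by_cases hi : i = 0
      · simp [hi, Ed_zero_left]
      · obtain ⟨i', rfl⟩ : ∃ i', i = i' + 1 := ⟨i - 1, by omega⟩
        by_cases hj : k = 0
        · simp [hj, Ed]
        · obtain ⟨k', rfl⟩ : ∃ k', k = k' + 1 := ⟨k - 1, by omega⟩
          have hp1 : prev.getD (k' + 1) 0 = Ed s1 s2 i' (k' + 1) := by
            simpa using hprev (by omega) (k' + 1) (by omega)
          have hp2 : prev.getD k' 0 = Ed s1 s2 i' k' := by
            simpa using hprev (by omega) k' (by omega)
          have hc : r.getD k' 0 = Ed s1 s2 (i' + 1) k' := hval k' (by omega)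
          simp only [Nat.add_sub_cancel]
          rw [if_neg hi, if_neg hj]
          rw [hp1, hp2, hc]
          by_cases hch : s1.getD i' ' ' = s2.getD k' ' ' <;> simp [Ed]
    constructor
    · simp [hlen]
    · intro j hj
      by_cases hjk : j < k
      · rw [getD_snoc_lt _ _ _ (by omega)]
        exact hval j hjk
      · have : j = k := by omega
        subst this
        rw [getD_snoc_at _ _ _ (by omega)]
        exact hcell

-- characterization of A's table
theorem cedTable_spec (s1 s2 : List Char) :
    ∀ k, k ≤ s1.length + 1 →
      ((List.range k).foldl (fun tb (i : Nat) => tb ++ [cedRow s1 s2 (tb.getD (i - 1) []) i]) []).length = k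
      ∧ ∀ i, i < k → ∀ j, j ≤ s2.length →
        (((List.range k).foldl (fun tb (i : Nat) => tb ++ [cedRow s1 s2 (tb.getD (i - 1) []) i]) []).getD i []).getD j 0
          = Ed s1 s2 i j := by
  intro k
  induction k with
  | zero => intro _; exact ⟨rfl, by omega⟩
  | succ k ih =>
    intro hk
    obtain ⟨hlen, hval⟩ := ih (by omega)
    rw [List.range_succ, List.foldl_append]
    set tb := (List.range k).foldl (fun tb (i : Nat) => tb ++ [cedRow s1 s2 (tb.getD (i - 1) []) i]) [] with htb
    simp only [List.foldl_cons, List.foldl_nil]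
    have hprev : 0 < k → ∀ j, j ≤ s2.length → (tb.getD (k - 1) []).getD j 0 = Ed s1 s2 (k - 1) j := by
      intro hk0 j hj
      exact hval (k - 1) (by omega) j hj
    have hrow := cedRow_spec s1 s2 (tb.getD (k - 1) []) k hprev (s2.length + 1) (by omega)
    constructor
    · simp [hlen]
    · intro i hi j hj
      by_cases hik : i < k
      · rw [getD_snoc_lt _ _ _ (by omega)]
        exact hval i hik j hj
      · have : i = k := by omega
        subst this
        rw [getD_snoc_at _ _ _ (by omega)]
        exact hrow.2 j (by omega)

theorem cedTable_getD (s1 s2 : List Char) :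
    ∀ i, i ≤ s1.length → ∀ j, j ≤ s2.length →
      ((cedTable s1 s2).getD i []).getD j 0 = Ed s1 s2 i j := by
  intro i hi j hj
  exact (cedTable_spec s1 s2 (s1.length + 1) (by omega)).2 i (by omega) j hj

-- characterization of B's row 0
theorem altRow0_spec (s1 s2 : List Char) :
    ∀ k, k ≤ s2.length + 1 →
      ((List.range k).foldl
        (fun st (j : Nat) => (st.1 ++ [((j : Int), st.2)], EPath.node 'I' (j : Int) st.2))
        ([], EPath.nil)).1.length = k
      ∧ ((List.range k).foldl
          (fun st (j : Nat) => (st.1 ++ [((j : Int), st.2)], EPath.node 'I' (j : Int) st.2))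
          ([], EPath.nil)).2 = (if k = 0 then EPath.nil else EPath.node 'I' ((k : Int) - 1) (Pathspec s1 s2 0 (k - 1)))
      ∧ ∀ j, j < k →
        ((List.range k).foldl
          (fun st (j : Nat) => (st.1 ++ [((j : Int), st.2)], EPath.node 'I' (j : Int) st.2))
          ([], EPath.nil)).1.getD j (0, .nil) = (Ed s1 s2 0 j, Pathspec s1 s2 0 j) := by
  intro k
  induction k with
  | zero => intro _; exact ⟨rfl, rfl, by omega⟩
  | succ k ih =>
    intro hk
    obtain ⟨hlen, hp, hval⟩ := ih (by omega)
    rw [List.range_succ, List.foldl_append]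
    set st := (List.range k).foldl
      (fun st (j : Nat) => (st.1 ++ [((j : Int), st.2)], EPath.node 'I' (j : Int) st.2))
      (([], EPath.nil) : List (Int × EPath) × EPath) with hst
    simp only [List.foldl_cons, List.foldl_nil]
    have hpk : st.2 = Pathspec s1 s2 0 k := by
      rw [hp]
      by_cases hk0 : k = 0
      · simp [hk0, Pathspec]
      · obtain ⟨k', rfl⟩ : ∃ k', k = k' + 1 := ⟨k - 1, by omega⟩
        simp [Pathspec]
    refine ⟨by simp [hlen], ?_, ?_⟩
    · rw [if_neg (by omega)]
      simp only [Nat.add_sub_cancel]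
      rw [hpk]
      congr 1
      push_cast; ring
    · intro j hj
      by_cases hjk : j < k
      · rw [getD_snoc_lt _ _ _ (by omega)]
        exact hval j hjk
      · have : j = k := by omega
        subst this
        rw [getD_snoc_at _ _ _ (by omega), hpk, Ed_zero_left]
  
-- characterization of B's row fill for i = i' + 1
theorem altRow_spec (s1 s2 : List Char) (prev : List (Int × EPath)) (i' : Nat)
    (hprev : ∀ j, j ≤ s2.length → prev.getD j (0, .nil) = (Ed s1 s2 i' j, Pathspec s1 s2 i' j)) :
    ∀ k, k ≤ s2.length →
      ((List.range' 1 k).foldl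
        (fun cur (j : Nat) =>
          if s1.getD ((i' + 1) - 1) ' ' = s2.getD (j - 1) ' ' then cur ++ [prev.getD (j - 1) (0, .nil)]
          else
            let a := (prev.getD j (0, .nil)).1
            let pa := (prev.getD j (0, .nil)).2
            let b := (cur.getD (j - 1) (0, .nil)).1
            let pb := (cur.getD (j - 1) (0, .nil)).2
            let c := (prev.getD (j - 1) (0, .nil)).1
            let pc := (prev.getD (j - 1) (0, .nil)).2
            if a ≤ b ∧ a ≤ c then cur ++ [(a + 1, .node 'D' (((i' + 1 : Nat) : Int) - 1) pa)]
            else if b ≤ c then cur ++ [(b + 1, .node 'I' ((j : Int) - 1) pb)]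
            else cur ++ [(c + 1, .node 'R' (((i' + 1 : Nat) : Int) - 1) pc)])
        [(((i' + 1 : Nat) : Int), EPath.node 'D' (((i' + 1 : Nat) : Int) - 1) (prev.getD 0 (0, .nil)).2)]).length = k + 1
      ∧ ∀ j, j ≤ k →
        ((List.range' 1 k).foldl
          (fun cur (j : Nat) =>
            if s1.getD ((i' + 1) - 1) ' ' = s2.getD (j - 1) ' ' then cur ++ [prev.getD (j - 1) (0, .nil)]
            else
              let a := (prev.getD j (0, .nil)).1
              let pa := (prev.getD j (0, .nil)).2
              let b := (cur.getD (j - 1) (0, .nil)).1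
              let pb := (cur.getD (j - 1) (0, .nil)).2
              let c := (prev.getD (j - 1) (0, .nil)).1
              let pc := (prev.getD (j - 1) (0, .nil)).2
              if a ≤ b ∧ a ≤ c then cur ++ [(a + 1, .node 'D' (((i' + 1 : Nat) : Int) - 1) pa)]
              else if b ≤ c then cur ++ [(b + 1, .node 'I' ((j : Int) - 1) pb)]
              else cur ++ [(c + 1, .node 'R' (((i' + 1 : Nat) : Int) - 1) pc)])
          [(((i' + 1 : Nat) : Int), EPath.node 'D' (((i' + 1 : Nat) : Int) - 1) (prev.getD 0 (0, .nil)).2)]).getD j (0, .nil)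
          = (Ed s1 s2 (i' + 1) j, Pathspec s1 s2 (i' + 1) j) := by
  intro k
  induction k with
  | zero =>
    intro _
    refine ⟨rfl, ?_⟩
    intro j hj
    interval_cases j
    have h0 : prev.getD 0 (0, .nil) = (Ed s1 s2 i' 0, Pathspec s1 s2 i' 0) := hprev 0 (by omega)
    simp only [List.range'_zero, List.foldl_nil, List.getD_cons_zero, h0]
    rw [show Ed s1 s2 (i' + 1) 0 = ((i' + 1 : Nat) : Int) from by rw [Ed_zero_right],
        show Pathspec s1 s2 (i' + 1) 0 = EPath.node 'D' (i' : Int) (Pathspec s1 s2 i' 0) from by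
          simp [Pathspec]]
    congr 2
    push_cast; ring
  | succ k ih =>
    intro hk
    obtain ⟨hlen, hval⟩ := ih (by omega)
    have hrange : List.range' 1 (k + 1) = List.range' 1 k ++ [1 + k] := by
      simpa using List.range'_concat (s := 1) (n := k) (step := 1)
    rw [hrange, List.foldl_append]
    set cur := (List.range' 1 k).foldl
      (fun cur (j : Nat) =>
        if s1.getD ((i' + 1) - 1) ' ' = s2.getD (j - 1) ' ' then cur ++ [prev.getD (j - 1) (0, .nil)]
        else
          let a := (prev.getD j (0, .nil)).1
          let pa := (prev.getD j (0, .nil)).2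
          let b := (cur.getD (j - 1) (0, .nil)).1
          let pb := (cur.getD (j - 1) (0, .nil)).2
          let c := (prev.getD (j - 1) (0, .nil)).1
          let pc := (prev.getD (j - 1) (0, .nil)).2
          if a ≤ b ∧ a ≤ c then cur ++ [(a + 1, .node 'D' (((i' + 1 : Nat) : Int) - 1) pa)]
          else if b ≤ c then cur ++ [(b + 1, .node 'I' ((j : Int) - 1) pb)]
          else cur ++ [(c + 1, .node 'R' (((i' + 1 : Nat) : Int) - 1) pc)])
      [(((i' + 1 : Nat) : Int), EPath.node 'D' (((i' + 1 : Nat) : Int) - 1) (prev.getD 0 (0, .nil)).2)] with hcur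
    simp only [List.foldl_cons, List.foldl_nil]
    have hj1 : 1 + k - 1 = k := by omega
    have ha : prev.getD (1 + k) (0, .nil) = (Ed s1 s2 i' (k + 1), Pathspec s1 s2 i' (k + 1)) := by
      rw [show 1 + k = k + 1 by omega]; exact hprev (k + 1) (by omega)
    have hb : cur.getD k (0, .nil) = (Ed s1 s2 (i' + 1) k, Pathspec s1 s2 (i' + 1) k) := hval k (le_refl k)
    have hc : prev.getD k (0, .nil) = (Ed s1 s2 i' k, Pathspec s1 s2 i' k) := hprev k (by omega)
    have hii : ((i' + 1 : Nat) : Int) - 1 = (i' : Int) := by push_cast; ring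
    have hjj : ((1 + k : Nat) : Int) - 1 = (k : Int) := by push_cast; ring
    have hcell :
        (if s1.getD ((i' + 1) - 1) ' ' = s2.getD (1 + k - 1) ' ' then cur ++ [prev.getD (1 + k - 1) (0, .nil)]
         else
           let a := (prev.getD (1 + k) (0, .nil)).1
           let pa := (prev.getD (1 + k) (0, .nil)).2
           let b := (cur.getD (1 + k - 1) (0, .nil)).1
           let pb := (cur.getD (1 + k - 1) (0, .nil)).2
           let c := (prev.getD (1 + k - 1) (0, .nil)).1
           let pc := (prev.getD (1 + k - 1) (0, .nil)).2
           if a ≤ b ∧ a ≤ c then cur ++ [(a + 1, .node 'D' (((i' + 1 : Nat) : Int) - 1) pa)]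
           else if b ≤ c then cur ++ [(b + 1, .node 'I' (((1 + k : Nat) : Int) - 1) pb)]
           else cur ++ [(c + 1, .node 'R' (((i' + 1 : Nat) : Int) - 1) pc)])
        = cur ++ [(Ed s1 s2 (i' + 1) (k + 1), Pathspec s1 s2 (i' + 1) (k + 1))] := by
      simp only [hj1, Nat.add_sub_cancel, ha, hb, hc, hii, hjj]
      by_cases hch : s1.getD i' ' ' = s2.getD k ' '
      · rw [if_pos hch,
            show Ed s1 s2 (i' + 1) (k + 1) = Ed s1 s2 i' k from by simp only [Ed]; rw [if_pos hch],
            show Pathspec s1 s2 (i' + 1) (k + 1) = Pathspec s1 s2 i' k from by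
              simp only [Pathspec]; rw [if_pos hch]]
      · rw [if_neg hch]
        have hEd : Ed s1 s2 (i' + 1) (k + 1)
            = 1 + min (Ed s1 s2 i' (k + 1)) (min (Ed s1 s2 (i' + 1) k) (Ed s1 s2 i' k)) := by
          simp only [Ed]; rw [if_neg hch]
        have hP : Pathspec s1 s2 (i' + 1) (k + 1)
            = (if Ed s1 s2 i' (k + 1) ≤ Ed s1 s2 (i' + 1) k ∧ Ed s1 s2 i' (k + 1) ≤ Ed s1 s2 i' k then
                 EPath.node 'D' (i' : Int) (Pathspec s1 s2 i' (k + 1))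
               else if Ed s1 s2 (i' + 1) k ≤ Ed s1 s2 i' k then EPath.node 'I' (k : Int) (Pathspec s1 s2 (i' + 1) k)
               else EPath.node 'R' (i' : Int) (Pathspec s1 s2 i' k)) := by
          simp only [Pathspec]; rw [if_neg hch]
        split_ifs with h1 h2
        · rw [hP, if_pos h1]
          congr 2
          rw [hEd, min3_eq_left.mpr h1]; ring
        · rw [hP, if_neg h1, if_pos h2]
          congr 2
          rw [hEd, (min3_eq_mid h1).mpr h2]; ring
        · rw [hP, if_neg h1, if_neg h2]
          congr 2
          rw [hEd]
          have h3 : min (Ed s1 s2 i' (k + 1)) (min (Ed s1 s2 (i' + 1) k) (Ed s1 s2 i' k)) = Ed s1 s2 i' k := by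
            simp only [min_def]; split_ifs <;> omega
          rw [h3]; ring
    rw [hcell]
    constructor
    · simp [hlen]
    · intro j hj
      by_cases hjk : j ≤ k
      · rw [getD_snoc_lt _ _ _ (by omega)]
        exact hval j hjk
      · have : j = k + 1 := by omega
        subst this
        rw [getD_snoc_at _ _ _ (by omega)]

-- characterization of B's whole fill
theorem altFill_spec (s1 s2 : List Char) :
    ∀ k, k ≤ s1.length →
      ∀ j, j ≤ s2.length →
        ((List.range' 1 k).foldl (fun prev i => altRow s1 s2 prev i) (altRow0 s2.length)).getD j (0, .nil)
          = (Ed s1 s2 k j, Pathspec s1 s2 k j) := by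
  intro k
  induction k with
  | zero =>
    intro _ j hj
    simp only [List.range'_zero, List.foldl_nil, altRow0]
    exact (altRow0_spec s1 s2 (s2.length + 1) (by omega)).2.2 j (by omega)
  | succ k ih =>
    intro hk j hj
    have hrange : List.range' 1 (k + 1) = List.range' 1 k ++ [1 + k] := by
      simpa using List.range'_concat (s := 1) (n := k) (step := 1)
    rw [hrange, List.foldl_append]
    simp only [List.foldl_cons, List.foldl_nil]
    have hprev : ∀ j, j ≤ s2.length →
        ((List.range' 1 k).foldl (fun prev i => altRow s1 s2 prev i) (altRow0 s2.length)).getD j (0, .nil)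
          = (Ed s1 s2 k j, Pathspec s1 s2 k j) := fun j hj => ih (by omega) j hj
    have h1k : (1 + k : Nat) = k + 1 := by omega
    rw [h1k]
    exact (altRow_spec s1 s2 _ k hprev s2.length (le_refl _)).2 j hj

-- A's value-comparing traceback computes exactly the collection of the specified chain
theorem back_collect (s1 s2 : List Char) (dp : List (List Int))
    (hdp : ∀ i, i ≤ s1.length → ∀ j, j ≤ s2.length → ((dp.getD i []).getD j 0) = Ed s1 s2 i j) :
    ∀ N i j, i + j ≤ N → i ≤ s1.length → j ≤ s2.length → ∀ ins del rep,
      cedBackF s1 s2 dp N i j ins del rep = collectP (Pathspec s1 s2 i j) ins del rep := by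
  intro N
  induction N with
  | zero =>
    intro i j hN hi hj ins del rep
    have hi0 : i = 0 := by omega
    have hj0 : j = 0 := by omega
    subst hi0; subst hj0
    rw [show Pathspec s1 s2 0 0 = EPath.nil from by simp [Pathspec]]
    rfl
  | succ N ih =>
    intro i j hN hi hj ins del rep
    by_cases h0 : i = 0 ∧ j = 0
    · obtain ⟨rfl, rfl⟩ := h0
      rw [show Pathspec s1 s2 0 0 = EPath.nil from by simp [Pathspec]]
      rfl
    · rw [cedBackF]
      rw [if_neg h0]
      by_cases hij : 0 < i ∧ 0 < j
      · obtain ⟨hi0, hj0⟩ := hij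
        obtain ⟨i', rfl⟩ : ∃ i', i = i' + 1 := ⟨i - 1, by omega⟩
        obtain ⟨j', rfl⟩ : ∃ j', j = j' + 1 := ⟨j - 1, by omega⟩
        by_cases hch : s1.getD ((i' + 1) - 1) ' ' = s2.getD ((j' + 1) - 1) ' '
        · have hchP : s1.getD i' ' ' = s2.getD j' ' ' := by simpa using hch
          rw [if_pos ⟨by omega, by omega, hch⟩]
          have hPM : Pathspec s1 s2 (i' + 1) (j' + 1) = Pathspec s1 s2 i' j' := by
            simp only [Pathspec]; rw [if_pos hchP]
          rw [hPM]
          exact ih _ _ (by omega) (by omega) (by omega) ins del rep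
        · have hchP : ¬ s1.getD i' ' ' = s2.getD j' ' ' := by simpa using hch
          rw [if_neg (by intro hcon; exact hch hcon.2.2)]
          set a := Ed s1 s2 i' (j' + 1) with hadef
          set b := Ed s1 s2 (i' + 1) j' with hbdef
          set c := Ed s1 s2 i' j' with hcdef
          have hv : (dp.getD (i' + 1) []).getD (j' + 1) 0 = 1 + min a (min b c) := by
            rw [hadef, hbdef, hcdef, hdp _ hi _ hj]; simp only [Ed]; rw [if_neg hchP]
          have hA : (dp.getD i' []).getD (j' + 1) 0 = a := hdp _ (by omega) _ hj
          have hB : (dp.getD (i' + 1) []).getD j' 0 = b := hdp _ hi _ (by omega)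
          have hP : Pathspec s1 s2 (i' + 1) (j' + 1)
              = (if a ≤ b ∧ a ≤ c then EPath.node 'D' (i' : Int) (Pathspec s1 s2 i' (j' + 1))
                 else if b ≤ c then EPath.node 'I' (j' : Int) (Pathspec s1 s2 (i' + 1) j')
                 else EPath.node 'R' (i' : Int) (Pathspec s1 s2 i' j')) := by
            rw [hadef, hbdef, hcdef]; simp only [Pathspec]; rw [if_neg hchP]
          simp only [Nat.add_sub_cancel] at hA hB ⊢
          have hcast : ((i' + 1 : Nat) : Int) - 1 = (i' : Int) := by push_cast; ring
          have hcast' : ((j' + 1 : Nat) : Int) - 1 = (j' : Int) := by push_cast; ring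
          by_cases hd : a ≤ b ∧ a ≤ c
          · have : 1 + min a (min b c) = a + 1 := by rw [min3_eq_left.mpr hd]; ring
            rw [if_pos ⟨by omega, by rw [hv, hA, this]⟩]
            rw [hP, if_pos hd]
            rw [collectP, if_neg (by decide), if_pos rfl, hcast]
            exact ih _ _ (by omega) (by omega) (by omega) _ _ _
          · have hnd : ¬ ((dp.getD (i' + 1) []).getD (j' + 1) 0 = (dp.getD i' []).getD (j' + 1) 0 + 1) := by
              rw [hv, hA]
              intro hcon
              exact hd (min3_eq_left.mp (by omega))
            rw [if_neg (by intro hcon; exact hnd hcon.2)]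
            by_cases hins : b ≤ c
            · have : 1 + min a (min b c) = b + 1 := by rw [(min3_eq_mid hd).mpr hins]; ring
              rw [if_pos ⟨by omega, by rw [hv, hB, this]⟩]
              rw [hP, if_neg hd, if_pos hins]
              rw [collectP, if_pos rfl, hcast']
              exact ih _ _ (by omega) (by omega) (by omega) _ _ _
            · have hni : ¬ ((dp.getD (i' + 1) []).getD (j' + 1) 0 = (dp.getD (i' + 1) []).getD j' 0 + 1) := by
                rw [hv, hB]
                intro hcon
                exact hins ((min3_eq_mid hd).mp (by omega))
              rw [if_neg (by intro hcon; exact hni hcon.2)]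
              rw [hP, if_neg hd, if_neg hins]
              rw [collectP, if_neg (by decide), if_neg (by decide), hcast]
              exact ih _ _ (by omega) (by omega) (by omega) _ _ _
      · by_cases hi0 : i = 0
        · subst hi0
          obtain ⟨j', rfl⟩ : ∃ j', j = j' + 1 := ⟨j - 1, by omega⟩
          have hv : (dp.getD 0 []).getD (j' + 1) 0 = ((j' + 1 : Nat) : Int) := by
            rw [hdp 0 (by omega) _ hj, Ed_zero_left]
          have hv' : (dp.getD 0 []).getD j' 0 = ((j' : Nat) : Int) := by
            rw [hdp 0 (by omega) _ (by omega), Ed_zero_left]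
          rw [if_neg (by simp), if_neg (by simp)]
          rw [if_pos ⟨by omega, by rw [hv]; simp only [Nat.add_sub_cancel, hv']; push_cast; ring⟩]
          have hcast' : ((j' + 1 : Nat) : Int) - 1 = (j' : Int) := by push_cast; ring
          rw [show Pathspec s1 s2 0 (j' + 1) = EPath.node 'I' (j' : Int) (Pathspec s1 s2 0 j') from by simp [Pathspec]]
          rw [collectP, if_pos rfl, hcast']
          simp only [Nat.add_sub_cancel]
          exact ih _ _ (by omega) (by omega) (by omega) _ _ _
        · have hj0 : j = 0 := by omega
          subst hj0
          obtain ⟨i', rfl⟩ : ∃ i', i = i' + 1 := ⟨i - 1, by omega⟩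
          have hv : (dp.getD (i' + 1) []).getD 0 0 = ((i' + 1 : Nat) : Int) := by
            rw [hdp _ hi 0 (by omega), Ed_zero_right]
          have hv' : (dp.getD i' []).getD 0 0 = ((i' : Nat) : Int) := by
            rw [hdp _ (by omega) 0 (by omega), Ed_zero_right]
          rw [if_neg (by simp)]
          rw [if_pos ⟨by omega, by simp only [Nat.add_sub_cancel]; rw [hv, hv']; push_cast; ring⟩]
          have hcast : ((i' + 1 : Nat) : Int) - 1 = (i' : Int) := by push_cast; ring
          rw [show Pathspec s1 s2 (i' + 1) 0 = EPath.node 'D' (i' : Int) (Pathspec s1 s2 i' 0) from by simp [Pathspec]]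
          rw [collectP, if_neg (by decide), if_pos rfl, hcast]
          simp only [Nat.add_sub_cancel]
          exact ih _ _ (by omega) (by omega) (by omega) _ _ _

-- ===== VERDICT (by name: the statement is the Claim_ definition above) =====
theorem character_edit_positions_spec : Claim_equal_character_edit_positions := by
  intro str1 str2 _
  unfold Spec_character_edit_positions character_edit_positions character_edit_positions_alt
  set s1 := str1.toList
  set s2 := str2.toList
  have hdp : ∀ i, i ≤ s1.length → ∀ j, j ≤ s2.length →
      (((cedTable s1 s2).getD i []).getD j 0) = Ed s1 s2 i j := cedTable_getD s1 s2
  have hfin : (altFill s1 s2).getD s2.length (0, .nil)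
      = (Ed s1 s2 s1.length s2.length, Pathspec s1 s2 s1.length s2.length) := by
    unfold altFill
    exact altFill_spec s1 s2 s1.length (le_refl _) s2.length (le_refl _)
  rw [hfin]
  exact back_collect s1 s2 (cedTable s1 s2) hdp
    (s1.length + s2.length) s1.length s2.length (le_refl _) (le_refl _) (le_refl _) [] [] []
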